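-- pv_equiv track=rewrite | github.com/NicoVelaz01/parcial-1 | funciones_parcial.py | obtener_mejor_rating
-- ===== SOURCE A (Python) =====
-- def obtener_mejor_rating(lista, dato):
--     pelicula = None
--     mayor_rating = 0
--     flag_mayor_rating = True
--     for el in lista:
--         if flag_mayor_rating or el[dato] > mayor_rating:
--             mayor_rating = el[dato]
--             pelicula = el
--             flag_mayor_rating = False
--     return pelicula
-- ===== SOURCE B (Python) =====
-- def obtener_mejor_rating(lista, dato):
--     if not lista:
--         return None
--     return sorted(lista, key=lambda el: el[dato], reverse=True)[0]
-- ===== Notes on version B (the rewrite author's own statement) =====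
-- stated objective: simpler
-- what changed: Replaces the running-max scan with mutable state (best, rating, first-iteration flag) by a stable descending sort on the rating key followed by taking the first element; stability makes ties resolve to the first original element, matching A's strict >.
import Mathlib
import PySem

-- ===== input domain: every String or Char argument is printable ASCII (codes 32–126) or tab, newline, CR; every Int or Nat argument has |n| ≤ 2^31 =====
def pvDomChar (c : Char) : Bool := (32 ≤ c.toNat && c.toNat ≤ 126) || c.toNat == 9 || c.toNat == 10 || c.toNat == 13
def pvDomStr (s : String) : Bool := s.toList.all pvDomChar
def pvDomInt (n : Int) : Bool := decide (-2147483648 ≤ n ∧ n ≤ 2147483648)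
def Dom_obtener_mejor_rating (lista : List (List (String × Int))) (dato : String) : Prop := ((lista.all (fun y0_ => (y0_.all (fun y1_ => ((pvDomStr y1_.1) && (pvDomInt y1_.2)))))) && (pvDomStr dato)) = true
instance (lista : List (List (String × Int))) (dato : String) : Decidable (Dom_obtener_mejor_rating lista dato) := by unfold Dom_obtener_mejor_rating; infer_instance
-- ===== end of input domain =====

-- B replaces A's running-max scan (best/rating/flag state) by a stable descending sort on the
-- rating key followed by taking the first element; equal results on every input where no KeyError occurs.

-- el[dato] on a dict (association list): value of the first matching key.
-- Total form with default 0; Pre_ guarantees the key is present, so the default is never used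
-- on admitted inputs (Python raises KeyError exactly where find? is none).
def pvLook (el : List (String × Int)) (dato : String) : Int :=
  (((el.find? (fun p => p.1 == dato)).map (fun p => p.2)).getD 0)

-- ===== PORT A =====
-- literal port: state (pelicula, mayor_rating, flag_mayor_rating), same branch
def obtener_mejor_rating (lista : List (List (String × Int))) (dato : String) : Option (List (String × Int)) :=
  (lista.foldl
    (fun s el =>
      if s.2.2 || decide (s.2.1 < pvLook el dato) then (some el, pvLook el dato, false) else s)
    ((none : Option (List (String × Int))), (0 : Int), true)).1

-- ===== PORT B =====
-- literal port of Source B: empty guard, then sorted(lista, key=…, reverse=True)[0]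
def obtener_mejor_rating_alt (lista : List (List (String × Int))) (dato : String) : Option (List (String × Int)) :=
  if lista = [] then none
  else PySem.List.pyGet? (PySem.List.sorted lista (fun el => pvLook el dato) true) 0

-- ===== PRECONDITION & SPEC =====
-- Pre_ excludes exactly the inputs where Python's el[dato] raises KeyError (some element lacks the key).
def Pre_obtener_mejor_rating (lista : List (List (String × Int))) (dato : String) : Prop :=
  (lista.all (fun el => (el.find? (fun p => p.1 == dato)).isSome)) = true
instance (lista : List (List (String × Int))) (dato : String) : Decidable (Pre_obtener_mejor_rating lista dato) := by unfold Pre_obtener_mejor_rating; infer_instance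

def pvWitness_obtener_mejor_rating : (List (List (String × Int))) × String :=
  ([[("rating", 5), ("x", 1)], [("rating", 7)], [("rating", 7), ("y", 0)]], "rating")

def Spec_obtener_mejor_rating (lista : List (List (String × Int))) (dato : String) (out : Option (List (String × Int))) : Prop := out = obtener_mejor_rating_alt lista dato
instance (lista : List (List (String × Int))) (dato : String) (out : Option (List (String × Int))) : Decidable (Spec_obtener_mejor_rating lista dato out) := by unfold Spec_obtener_mejor_rating; infer_instance

-- ===== CLAIM (what is proved, stated in full; the proofs are below) =====
def Claim_equal_obtener_mejor_rating : Prop := ∀ (lista : List (List (String × Int))) (dato : String), Dom_obtener_mejor_rating lista dato → Pre_obtener_mejor_rating lista dato → Spec_obtener_mejor_rating lista dato (obtener_mejor_rating lista dato)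

-- ===== LEMMAS AND PROOFS =====

-- reference running best: first element with maximal key (strict replacement)
def pvBest (key : List (String × Int) → Int) (xs : List (List (String × Int))) (b : List (String × Int)) : List (String × Int) :=
  xs.foldl (fun b el => if key b < key el then el else b) b

-- A's loop, once started (flag false, rating = key of best), is the running best
theorem pvA_loop (dato : String) (xs : List (List (String × Int))) (b : List (String × Int)) :
    xs.foldl
      (fun s el =>
        if s.2.2 || decide (s.2.1 < pvLook el dato) then (some el, pvLook el dato, false) else s)
      (some b, pvLook b dato, false)
    = (some (pvBest (fun el => pvLook el dato) xs b), pvLook (pvBest (fun el => pvLook el dato) xs b) dato, false) := by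
  induction xs generalizing b with
  | nil => simp [pvBest]
  | cons x t ih =>
    simp only [List.foldl_cons, pvBest, Bool.false_or]
    by_cases h : pvLook b dato < pvLook x dato
    · simp only [h, decide_true, if_pos]
      exact ih x
    · simp only [h, decide_false, if_false]
      exact ih b

-- head of the insertion fold is the running best
theorem pvIns_head (key : List (String × Int) → Int) (xs : List (List (String × Int)))
    (acc : List (List (String × Int))) (b : List (String × Int)) (hb : acc.head? = some b) :
    (xs.foldl (fun acc x => PySem.List.insertBy (fun a c => decide (key c < key a)) x acc) acc).head?
      = some (pvBest key xs b) := by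
  induction xs generalizing acc b with
  | nil => simpa [pvBest] using hb
  | cons x t ih =>
    cases acc with
    | nil => simp at hb
    | cons h0 rest =>
      simp only [List.head?_cons, Option.some.injEq] at hb
      subst hb
      simp only [List.foldl_cons, pvBest, PySem.List.insertBy]
      by_cases h : key h0 < key x
      · simp only [h, decide_true, if_true]
        exact ih _ x (by simp)
      · simp only [h, decide_false, if_false]
        exact ih _ h0 (by simp)

-- ===== VERDICT (by name: the statement is the Claim_ definition above) =====
theorem obtener_mejor_rating_spec : Claim_equal_obtener_mejor_rating := by
  intro lista dato _ _
  unfold Spec_obtener_mejor_rating obtener_mejor_rating obtener_mejor_rating_alt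
  cases lista with
  | nil => simp
  | cons x xs =>
    simp only [if_neg (List.cons_ne_nil x xs), List.foldl_cons, Bool.true_or, if_true]
    rw [pvA_loop, PySem.List.sorted_rev_eq_foldl_insertBy, PySem.List.pyGet?_zero,
      ← List.head?_eq_getElem?]
    simp only [List.foldl_cons, PySem.List.insertBy]
    rw [pvIns_head (fun el => pvLook el dato) xs [x] x (by simp)]
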